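-- pv_equiv track=rewrite | github.com/timholds/3b1b_dataset | analyze_dependencies.py | find_dependencies_recursive
-- ===== SOURCE A (Python) =====
-- from typing import Set, Dict, List, Tuple
--
-- def find_dependencies_recursive(module: str, dependencies: Dict[str, Set[str]],
--                                visited: Set[str]) -> Set[str]:
--     """Recursively find all dependencies of a module."""
--     if module in visited:
--         return set()
--
--     visited.add(module)
--     all_deps = set()
--
--     if module in dependencies:
--         direct_deps = dependencies[module]
--         all_deps.update(direct_deps)
--
--         for dep in direct_deps:
--             all_deps.update(find_dependencies_recursive(dep, dependencies, visited.copy()))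
--
--     return all_deps
-- ===== SOURCE B (Python) =====
-- def find_dependencies_recursive(module, dependencies, visited):
--     """Single depth-first traversal with one shared visited set and one shared
--     result accumulator (instead of per-branch copies of the visited set with
--     set-unions of the returned values).  Does not mutate `visited`."""
--     seen = set(visited)
--     result = set()
--
--     def dfs(u):
--         if u in seen:
--             return
--         seen.add(u)
--         if u in dependencies:
--             direct = dependencies[u]
--             result.update(direct)
--             for d in direct:
--                 dfs(d)
--
--     dfs(module)
--     return result
-- ===== Notes on version B (the rewrite author's own statement) =====
-- stated objective: alternative
-- what changed: A recurses with a fresh copy of the visited set per branch and unions the sets returned by the recursive calls (it can re-expand the same node along different paths); B is one depth-first traversal with a single shared visited set and one shared result accumulator, expanding each node at most once.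
import Mathlib
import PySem

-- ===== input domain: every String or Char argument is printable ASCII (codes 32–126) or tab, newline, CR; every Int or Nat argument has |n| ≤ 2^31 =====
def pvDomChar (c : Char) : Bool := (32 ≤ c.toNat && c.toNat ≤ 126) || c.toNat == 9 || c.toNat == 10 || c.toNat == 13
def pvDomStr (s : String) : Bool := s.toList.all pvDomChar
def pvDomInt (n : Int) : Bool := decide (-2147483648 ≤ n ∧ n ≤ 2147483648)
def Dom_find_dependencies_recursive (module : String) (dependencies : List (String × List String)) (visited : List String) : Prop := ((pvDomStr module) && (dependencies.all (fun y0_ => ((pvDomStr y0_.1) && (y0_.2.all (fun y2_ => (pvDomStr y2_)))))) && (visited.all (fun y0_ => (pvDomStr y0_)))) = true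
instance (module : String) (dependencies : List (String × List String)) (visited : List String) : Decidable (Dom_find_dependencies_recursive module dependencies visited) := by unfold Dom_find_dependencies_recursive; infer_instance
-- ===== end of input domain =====

-- B replaces A's per-branch copies of `visited` (and the set-unions of the recursive results)
-- by one depth-first traversal with a single shared visited set and one result accumulator.
-- Equivalence is about the RETURN value: A additionally adds `module` to the caller's `visited`
-- set in place, B does not mutate its arguments.

-- Termination infrastructure shared by both ports (cited in their decreasing_by):
-- the number of dependency keys not yet in the visited/seen set.
def pvKeysLeft (dependencies : List (String × List String)) (vis : List String) : Nat :=
  ((dependencies.map Prod.fst).toFinset.filter (fun k => k ∉ vis)).card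

theorem pvMemKeys_of_get? {l : List (String × List String)} {k : String} {v : List String}
    (h : PySem.Dict.get? (PySem.Dict.mk l) k = some v) : k ∈ l.map Prod.fst := by
  induction l with
  | nil => simp [PySem.Dict.get?] at h
  | cons p rest ih =>
    rw [show PySem.Dict.mk (p :: rest) = PySem.Dict.mk ((p.1, p.2) :: rest) by rfl,
      PySem.Dict.get?_mk_cons] at h
    by_cases he : p.1 == k
    · simp [he] at h ⊢
      left; exact (eq_of_beq he).symm ▸ rfl
    · simp [he] at h
      simp [ih h]

theorem pvKeysLeft_lt (deps : List (String × List String)) (m : String) (vis : List String)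
    (ds : List String) (hg : PySem.Dict.get? (PySem.Dict.mk deps) m = some ds)
    (hc : PySem.Set.contains vis m = false) :
    pvKeysLeft deps (PySem.Set.add vis m) < pvKeysLeft deps vis := by
  have hm : m ∈ deps.map Prod.fst := pvMemKeys_of_get? hg
  have hmv : m ∉ vis := by simpa using hc
  unfold pvKeysLeft
  have hset : ((deps.map Prod.fst).toFinset.filter (fun k => k ∉ PySem.Set.add vis m))
      = ((deps.map Prod.fst).toFinset.filter (fun k => k ∉ vis)).erase m := by
    ext k
    simp [Finset.mem_filter, Finset.mem_erase, PySem.Set.mem_add]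
    tauto
  rw [hset]
  exact Finset.card_erase_lt_of_mem (by simp [Finset.mem_filter, hm, hmv])

theorem pvKeysLeft_mono (deps : List (String × List String)) {vis vis' : List String}
    (h : ∀ x, x ∈ vis → x ∈ vis') : pvKeysLeft deps vis' ≤ pvKeysLeft deps vis := by
  unfold pvKeysLeft
  apply Finset.card_le_card
  intro k hk
  simp [Finset.mem_filter] at hk ⊢
  exact ⟨hk.1, fun hx => hk.2 (h k hx)⟩

theorem pvLexHelper {a b c d : Nat} (h1 : a ≤ b) (h2 : c < d) :
    Prod.Lex (· < ·) (· < ·) (a, c) (b, d) := by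
  rcases Nat.lt_or_eq_of_le h1 with h | h
  · exact Prod.Lex.left _ _ h
  · subst h; exact Prod.Lex.right _ h2

-- ===== PORT A =====
-- A: recursion with a fresh copy of `visited` per branch; the sibling `for dep in direct_deps`
-- loop is the structural recursion pvAFold (each child called with visited ∪ {module}).
mutual
def find_dependencies_recursive (module : String) (dependencies : List (String × List String)) (visited : List String) : List String :=
  if hc : PySem.Set.contains visited module = true then []
  else
    match hg : PySem.Dict.get? (PySem.Dict.mk dependencies) module with
    | none => []
    | some direct_deps =>
      pvAFold dependencies direct_deps (PySem.Set.add visited module)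
        (PySem.Set.update PySem.Set.empty direct_deps)
termination_by (pvKeysLeft dependencies visited, 0)
decreasing_by
  exact Prod.Lex.left _ _ (pvKeysLeft_lt dependencies module visited direct_deps hg (by simpa using hc))

def pvAFold (dependencies : List (String × List String)) (ds : List String) (vis' : List String) (acc : List String) : List String :=
  match ds with
  | [] => acc
  | d :: rest => pvAFold dependencies rest vis' (PySem.Set.update acc (find_dependencies_recursive d dependencies vis'))
termination_by (pvKeysLeft dependencies vis', ds.length + 1)
decreasing_by
  · exact pvLexHelper (Nat.le_refl _) (by simp [List.length_cons])
  · exact pvLexHelper (Nat.le_refl _) (by simp [List.length_cons])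
end

-- ===== PORT B =====
-- B: one DFS (pvBGo) with a single shared `seen` set and one shared `result` accumulator;
-- the `for d in direct: dfs(d)` loop is pvBLoop, threading (seen, result) left to right.
mutual
def pvBGo (dependencies : List (String × List String)) (u : String) (seen res : List String) : List String × List String :=
  if hc : PySem.Set.contains seen u = true then (seen, res)
  else
    match hg : PySem.Dict.get? (PySem.Dict.mk dependencies) u with
    | none => (PySem.Set.add seen u, res)
    | some ds => pvBLoop dependencies ds (PySem.Set.add seen u) (PySem.Set.update res ds)
termination_by (pvKeysLeft dependencies seen, 0)
decreasing_by
  exact Prod.Lex.left _ _ (pvKeysLeft_lt dependencies u seen ds hg (by simpa using hc))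

def pvBLoop (dependencies : List (String × List String)) (ds : List String) (seen res : List String) : List String × List String :=
  match ds with
  | [] => (seen, res)
  | d :: rest =>
    let p := pvBGo dependencies d seen res
    pvBLoop dependencies rest (PySem.Set.update seen p.1) p.2
termination_by (pvKeysLeft dependencies seen, ds.length + 1)
decreasing_by
  · exact pvLexHelper (Nat.le_refl _) (by simp [List.length_cons])
  · exact pvLexHelper (pvKeysLeft_mono dependencies
      (fun x hx => (PySem.Set.mem_update _ _ _).mpr (Or.inl hx))) (by simp [List.length_cons])
end

def find_dependencies_recursive_alt (module : String) (dependencies : List (String × List String)) (visited : List String) : List String :=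
  (pvBGo dependencies module (PySem.Set.ofList visited) PySem.Set.empty).2

-- ===== PRECONDITION & SPEC =====
def Spec_find_dependencies_recursive (module : String) (dependencies : List (String × List String)) (visited : List String) (out : List String) : Prop := out = find_dependencies_recursive_alt module dependencies visited
instance (module : String) (dependencies : List (String × List String)) (visited : List String) (out : List String) : Decidable (Spec_find_dependencies_recursive module dependencies visited out) := by unfold Spec_find_dependencies_recursive; infer_instance

-- ===== CLAIM (what is proved, stated in full; the proofs are below) =====
def Claim_equal_find_dependencies_recursive : Prop := ∀ (module : String) (dependencies : List (String × List String)) (visited : List String), Dom_find_dependencies_recursive module dependencies visited → Spec_find_dependencies_recursive module dependencies visited (find_dependencies_recursive module dependencies visited)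

-- ===== LEMMAS AND PROOFS =====

-- set-algebra facts about PySem.Set.update specific to the shapes in these two programs
theorem pvFilterNotContains (s : List String) (xs : List String) (h : ∀ x ∈ xs, x ∈ s) :
    List.filter (fun y => !PySem.Set.contains s y) xs = [] := by
  rw [List.filter_eq_nil_iff]
  intro a ha
  simp [PySem.Set.contains_eq_listContains]
  exact h a ha

theorem pvUpdOfList (s : PySem.Set String) (xs : List String) :
    s.update (PySem.Set.ofList xs) = s.update xs := by
  rw [PySem.Set.update_eq_append_filter, PySem.Set.update_eq_append_filter, PySem.Set.ofList_ofList]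

theorem pvUpdSubset (s : PySem.Set String) (xs : List String) (h : ∀ x ∈ xs, x ∈ s) :
    s.update xs = s := by
  rw [PySem.Set.update_eq_append_filter,
    pvFilterNotContains s _ (fun x hx => h x ((PySem.Set.mem_ofList xs x).1 hx)),
    List.append_nil]

theorem pvUpdAppendSelf (s Δ : List String) (h : (s ++ Δ).Nodup) :
    PySem.Set.update s (s ++ Δ) = s ++ Δ := by
  rw [PySem.Set.update_eq_append_filter, PySem.Set.ofList_eq_self_of_nodup _ h,
    List.filter_append, pvFilterNotContains s s (fun x hx => hx)]
  have h2 : List.filter (fun y => !PySem.Set.contains s y) Δ = Δ := by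
    rw [List.filter_eq_self]
    intro a ha
    have : a ∉ s := fun hs => (List.disjoint_of_nodup_append h) hs ha
    simp [PySem.Set.contains_eq_listContains]
    exact this
  rw [h2, List.nil_append]

theorem pvUpdAssoc (r a b : PySem.Set String) :
    r.update (a.update b) = (r.update a).update b := by
  induction b generalizing a with
  | nil => rw [PySem.Set.update_nil, PySem.Set.update_nil]
  | cons x b ih =>
    rw [PySem.Set.update_cons, PySem.Set.update_cons, ih]
    congr 1
    by_cases hx : x ∈ a
    · rw [PySem.Set.add_of_mem hx, PySem.Set.add_of_mem ((PySem.Set.mem_update r a x).2 (Or.inr hx))]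
    · rw [PySem.Set.add_of_not_mem hx, PySem.Set.update_append]
      have : PySem.Set.update (r.update a) [x] = (r.update a).add x := by
        rw [PySem.Set.update_cons, PySem.Set.update_nil]
      rw [this]

-- the adjacency list a node contributes, and the invariant of B's shared seen/result state
def pvAdj (deps : List (String × List String)) (x : String) : List String :=
  (PySem.Dict.get? (PySem.Dict.mk deps) x).getD []

def pvClosed (deps : List (String × List String)) (S vis R : List String) : Prop :=
  ∀ x ∈ S, x ∉ vis → ∀ d ∈ pvAdj deps x, d ∈ R ∧ d ∈ S

theorem pvClosed_vis_mono {deps : List (String × List String)} {S vis vis' R : List String}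
    (hv : ∀ x, x ∈ vis → x ∈ vis') (h : pvClosed deps S vis R) : pvClosed deps S vis' R :=
  fun x hx hnv => h x hx (fun hxv => hnv (hv x hxv))

-- distributing an outer update over A's accumulator fold
theorem pvFoldUpd (deps : List (String × List String)) (vis' : List String) :
    ∀ (ds : List String) (acc res : List String),
      PySem.Set.update res (pvAFold deps ds vis' acc)
        = ds.foldl (fun r d => PySem.Set.update r (find_dependencies_recursive d deps vis'))
            (PySem.Set.update res acc) := by
  intro ds
  induction ds with
  | nil => intro acc res; rw [pvAFold, List.foldl_nil]
  | cons d rest ih =>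
    intro acc res
    rw [pvAFold, ih, List.foldl_cons, pvUpdAssoc]

theorem pvAFoldNodup (deps : List (String × List String)) (vis' : List String) :
    ∀ (ds : List String) (acc : List String), acc.Nodup → (pvAFold deps ds vis' acc).Nodup := by
  intro ds
  induction ds with
  | nil => intro acc h; rw [pvAFold]; exact h
  | cons d rest ih =>
    intro acc h
    rw [pvAFold]
    exact ih _ (PySem.Set.nodup_update _ _ h)

theorem pvANodup (u : String) (deps : List (String × List String)) (vis : List String) :
    (find_dependencies_recursive u deps vis).Nodup := by
  rw [find_dependencies_recursive]
  split
  · exact List.nodup_nil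
  · split
    · exact List.nodup_nil
    · exact pvAFoldNodup _ _ _ _ (PySem.Set.nodup_update _ _ List.nodup_nil)

-- CRUX: once a node is in the closed seen-set, A's whole contribution from it is already in res
theorem pvAbsorb (deps : List (String × List String)) :
    ∀ n : Nat, ∀ vis seen res : List String, ∀ u : String,
      pvKeysLeft deps vis ≤ n → pvClosed deps seen vis res → u ∈ seen →
      PySem.Set.update res (find_dependencies_recursive u deps vis) = res := by
  intro n
  induction n using Nat.strong_induction_on with
  | _ n IH =>
    intro vis seen res u hn hC hu
    by_cases hv : u ∈ vis
    · rw [find_dependencies_recursive, dif_pos ((PySem.Set.contains_iff vis u).2 hv),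
        PySem.Set.update_nil]
    · have hcf : PySem.Set.contains vis u = false := by
        rw [← Bool.not_eq_true]
        exact fun hh => hv ((PySem.Set.contains_iff vis u).1 hh)
      rw [find_dependencies_recursive, dif_neg (by simpa using hv)]
      split
      · rw [PySem.Set.update_nil]
      · rename_i ds hget
        rw [pvFoldUpd, PySem.Set.update_empty, pvUpdOfList]
        have hds : ∀ d ∈ ds, d ∈ res ∧ d ∈ seen := by
          have h1 := hC u hu hv
          unfold pvAdj at h1
          rw [hget] at h1
          simpa using h1
        rw [pvUpdSubset res ds (fun d hd => (hds d hd).1)]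
        have hlt : pvKeysLeft deps (PySem.Set.add vis u) < pvKeysLeft deps vis :=
          pvKeysLeft_lt deps u vis ds hget hcf
        have hC' : pvClosed deps seen (PySem.Set.add vis u) res :=
          pvClosed_vis_mono (fun x hx => (PySem.Set.mem_add vis u x).2 (Or.inl hx)) hC
        have hstep : ∀ d, d ∈ seen →
            PySem.Set.update res (find_dependencies_recursive d deps (PySem.Set.add vis u)) = res :=
          fun d hd => IH (pvKeysLeft deps (PySem.Set.add vis u)) (lt_of_lt_of_le hlt hn)
            _ seen res d (Nat.le_refl _) hC' hd
        have hchain : ∀ l : List String, (∀ d ∈ l, d ∈ seen) →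
            l.foldl (fun r d =>
              PySem.Set.update r (find_dependencies_recursive d deps (PySem.Set.add vis u))) res
              = res := by
          intro l
          induction l with
          | nil => intro _; rfl
          | cons d t iht =>
            intro hl
            rw [List.foldl_cons, hstep d (hl d (by simp))]
            exact iht (fun x hx => hl x (by simp [hx]))
        exact hchain ds (fun d hd => (hds d hd).2)

-- unfolding equations for the two DFS functions, keyed on the branch taken
theorem pvBGo_eq_of_mem {deps : List (String × List String)} {u : String} {seen res : List String}
    (hcu : u ∈ seen) : pvBGo deps u seen res = (seen, res) := by
  rw [pvBGo, dif_pos ((PySem.Set.contains_iff seen u).2 hcu)]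

theorem pvBGo_eq_none {deps : List (String × List String)} {u : String} {seen res : List String}
    (hcu : u ∉ seen) (hget : PySem.Dict.get? (PySem.Dict.mk deps) u = none) :
    pvBGo deps u seen res = (PySem.Set.add seen u, res) := by
  rw [pvBGo, dif_neg (by simpa using hcu)]
  split <;> simp_all

theorem pvBGo_eq_some {deps : List (String × List String)} {u : String} {seen res ds : List String}
    (hcu : u ∉ seen) (hget : PySem.Dict.get? (PySem.Dict.mk deps) u = some ds) :
    pvBGo deps u seen res
      = pvBLoop deps ds (PySem.Set.add seen u) (PySem.Set.update res ds) := by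
  rw [pvBGo, dif_neg (by simpa using hcu)]
  split <;> simp_all

theorem pvBLoop_nil {deps : List (String × List String)} {seen res : List String} :
    pvBLoop deps [] seen res = (seen, res) := by rw [pvBLoop]

theorem pvBLoop_cons {deps : List (String × List String)} {d : String} {rest seen res : List String} :
    pvBLoop deps (d :: rest) seen res
      = pvBLoop deps rest (PySem.Set.update seen (pvBGo deps d seen res).1)
          (pvBGo deps d seen res).2 := by rw [pvBLoop]

theorem pvA_eq_none {deps : List (String × List String)} {u : String} {vis : List String}
    (hv : u ∉ vis) (hget : PySem.Dict.get? (PySem.Dict.mk deps) u = none) :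
    find_dependencies_recursive u deps vis = [] := by
  rw [find_dependencies_recursive, dif_neg (by simpa using hv)]
  split <;> simp_all

theorem pvA_eq_some {deps : List (String × List String)} {u : String} {vis ds : List String}
    (hv : u ∉ vis) (hget : PySem.Dict.get? (PySem.Dict.mk deps) u = some ds) :
    find_dependencies_recursive u deps vis
      = pvAFold deps ds (PySem.Set.add vis u) (PySem.Set.update PySem.Set.empty ds) := by
  rw [find_dependencies_recursive, dif_neg (by simpa using hv)]
  split <;> simp_all

-- MAIN: B's DFS state evolves exactly as res ↦ res.update (A's result)
theorem pvMain (deps : List (String × List String)) :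
    ∀ n : Nat,
      (∀ (u : String) (seen res vis : List String),
        pvKeysLeft deps seen ≤ n → (∀ x ∈ vis, x ∈ seen) → pvClosed deps seen vis res →
        seen.Nodup → res.Nodup →
        ∃ Δ, (pvBGo deps u seen res).1 = seen ++ Δ ∧ (pvBGo deps u seen res).1.Nodup ∧
          (pvBGo deps u seen res).2
            = PySem.Set.update res (find_dependencies_recursive u deps vis) ∧
          (pvBGo deps u seen res).2.Nodup ∧
          (∀ x ∈ res, x ∈ (pvBGo deps u seen res).2) ∧
          pvClosed deps (pvBGo deps u seen res).1 vis (pvBGo deps u seen res).2 ∧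
          u ∈ (pvBGo deps u seen res).1)
      ∧ (∀ (ds : List String) (seen res visC : List String),
        pvKeysLeft deps seen ≤ n → (∀ x ∈ visC, x ∈ seen) → pvClosed deps seen visC res →
        seen.Nodup → res.Nodup → (∀ d ∈ ds, d ∈ res) →
        ∃ Δ, (pvBLoop deps ds seen res).1 = seen ++ Δ ∧ (pvBLoop deps ds seen res).1.Nodup ∧
          (pvBLoop deps ds seen res).2
            = ds.foldl (fun r d => PySem.Set.update r (find_dependencies_recursive d deps visC)) res ∧
          (pvBLoop deps ds seen res).2.Nodup ∧
          (∀ x ∈ res, x ∈ (pvBLoop deps ds seen res).2) ∧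
          pvClosed deps (pvBLoop deps ds seen res).1 visC (pvBLoop deps ds seen res).2 ∧
          (∀ d ∈ ds, d ∈ (pvBLoop deps ds seen res).1)) := by
  intro n
  induction n using Nat.strong_induction_on with
  | _ n IH =>
    have hGO : ∀ (u : String) (seen res vis : List String),
        pvKeysLeft deps seen ≤ n → (∀ x ∈ vis, x ∈ seen) → pvClosed deps seen vis res →
        seen.Nodup → res.Nodup →
        ∃ Δ, (pvBGo deps u seen res).1 = seen ++ Δ ∧ (pvBGo deps u seen res).1.Nodup ∧
          (pvBGo deps u seen res).2
            = PySem.Set.update res (find_dependencies_recursive u deps vis) ∧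
          (pvBGo deps u seen res).2.Nodup ∧
          (∀ x ∈ res, x ∈ (pvBGo deps u seen res).2) ∧
          pvClosed deps (pvBGo deps u seen res).1 vis (pvBGo deps u seen res).2 ∧
          u ∈ (pvBGo deps u seen res).1 := by
      intro u seen res vis hn hSub hC hndS hndR
      by_cases hcu : u ∈ seen
      · rw [pvBGo_eq_of_mem hcu]
        exact ⟨[], (List.append_nil seen).symm, hndS,
          (pvAbsorb deps (pvKeysLeft deps vis) vis seen res u (Nat.le_refl _) hC hcu).symm,
          hndR, fun x hx => hx, hC, hcu⟩
      · have hv : u ∉ vis := fun h => hcu (hSub u h)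
        have hcf : PySem.Set.contains seen u = false := by
          rw [← Bool.not_eq_true]
          exact fun hh => hcu ((PySem.Set.contains_iff seen u).1 hh)
        rcases hget : PySem.Dict.get? (PySem.Dict.mk deps) u with _ | ds
        · rw [pvBGo_eq_none hcu hget]
          have hadd : PySem.Set.add seen u = seen ++ [u] := PySem.Set.add_of_not_mem hcu
          refine ⟨[u], hadd, hadd ▸ PySem.Set.nodup_add seen u hndS,
            by rw [pvA_eq_none hv hget, PySem.Set.update_nil], hndR, fun x hx => hx, ?_, ?_⟩
          · intro x hx hnv d hd
            rw [hadd] at hx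
            rcases List.mem_append.1 hx with hx | hx
            · have := hC x hx hnv d hd
              exact ⟨this.1, hadd ▸ List.mem_append_left _ this.2⟩
            · have hxu : x = u := by simpa using hx
              subst hxu
              unfold pvAdj at hd
              rw [hget] at hd
              simp at hd
          · exact (PySem.Set.mem_add seen u u).2 (Or.inr rfl)
        · have hadd : PySem.Set.add seen u = seen ++ [u] := PySem.Set.add_of_not_mem hcu
          have hm : pvKeysLeft deps (PySem.Set.add seen u) < pvKeysLeft deps seen :=
            pvKeysLeft_lt deps u seen ds hget hcf
          have hSub' : ∀ x ∈ PySem.Set.add vis u, x ∈ PySem.Set.add seen u := by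
            intro x hx
            rcases (PySem.Set.mem_add vis u x).1 hx with hx | hx
            · exact (PySem.Set.mem_add seen u x).2 (Or.inl (hSub x hx))
            · exact (PySem.Set.mem_add seen u x).2 (Or.inr hx)
          have hC1 : pvClosed deps (PySem.Set.add seen u) (PySem.Set.add vis u)
              (PySem.Set.update res ds) := by
            intro x hx hnv d hd
            rcases (PySem.Set.mem_add seen u x).1 hx with hx | hx
            · have hxv : x ∉ vis := fun h => hnv ((PySem.Set.mem_add vis u x).2 (Or.inl h))
              have := hC x hx hxv d hd
              exact ⟨(PySem.Set.mem_update res ds d).2 (Or.inl this.1),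
                (PySem.Set.mem_add seen u d).2 (Or.inl this.2)⟩
            · exact absurd ((PySem.Set.mem_add vis u x).2 (Or.inr hx)) hnv
          obtain ⟨Δ', l1, l2, l3, l4, l5, l6, l7⟩ :=
            (IH _ (lt_of_lt_of_le hm hn)).2 ds (PySem.Set.add seen u) (PySem.Set.update res ds)
              (PySem.Set.add vis u) (Nat.le_refl _) hSub' hC1
              (PySem.Set.nodup_add seen u hndS) (PySem.Set.nodup_update res ds hndR)
              (fun d hd => (PySem.Set.mem_update res ds d).2 (Or.inr hd))
          rw [pvBGo_eq_some hcu hget]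
          refine ⟨[u] ++ Δ', by rw [l1, hadd, List.append_assoc], l2, ?_, l4,
            fun x hx => l5 x ((PySem.Set.mem_update res ds x).2 (Or.inl hx)), ?_, ?_⟩
          · rw [l3, pvA_eq_some hv hget, pvFoldUpd, PySem.Set.update_empty, pvUpdOfList]
          · intro x hx hnv
            by_cases hxu : x = u
            · subst hxu
              intro d hd
              unfold pvAdj at hd
              rw [hget] at hd
              simp at hd
              exact ⟨l5 d ((PySem.Set.mem_update res ds d).2 (Or.inr hd)), l7 d hd⟩
            · have hnv' : x ∉ PySem.Set.add vis u := by
                intro h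
                rcases (PySem.Set.mem_add vis u x).1 h with h | h
                · exact hnv h
                · exact hxu h
              exact l6 x hx hnv'
          · rw [l1, hadd]
            simp
    have hLOOP : ∀ (ds : List String) (seen res visC : List String),
        pvKeysLeft deps seen ≤ n → (∀ x ∈ visC, x ∈ seen) → pvClosed deps seen visC res →
        seen.Nodup → res.Nodup → (∀ d ∈ ds, d ∈ res) →
        ∃ Δ, (pvBLoop deps ds seen res).1 = seen ++ Δ ∧ (pvBLoop deps ds seen res).1.Nodup ∧
          (pvBLoop deps ds seen res).2
            = ds.foldl (fun r d => PySem.Set.update r (find_dependencies_recursive d deps visC)) res ∧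
          (pvBLoop deps ds seen res).2.Nodup ∧
          (∀ x ∈ res, x ∈ (pvBLoop deps ds seen res).2) ∧
          pvClosed deps (pvBLoop deps ds seen res).1 visC (pvBLoop deps ds seen res).2 ∧
          (∀ d ∈ ds, d ∈ (pvBLoop deps ds seen res).1) := by
      intro ds
      induction ds with
      | nil =>
        intro seen res visC hn hSub hC hndS hndR hdres
        rw [pvBLoop_nil]
        exact ⟨[], (List.append_nil seen).symm, hndS, rfl, hndR, fun x hx => hx, hC,
          fun d hd => absurd hd (List.not_mem_nil)⟩
      | cons d rest ihr =>
        intro seen res visC hn hSub hC hndS hndR hdres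
        obtain ⟨Δ₁, g1, g2, g3, g4, g5, g6, g7⟩ := hGO d seen res visC hn hSub hC hndS hndR
        rw [pvBLoop_cons]
        have hupd : PySem.Set.update seen (pvBGo deps d seen res).1
            = (pvBGo deps d seen res).1 := by
          rw [g1]
          exact pvUpdAppendSelf _ _ (g1 ▸ g2)
        rw [hupd]
        have hmono1 : ∀ x ∈ seen, x ∈ (pvBGo deps d seen res).1 := by
          intro x hx
          rw [g1]
          exact List.mem_append_left _ hx
        obtain ⟨Δ₂, t1, t2, t3, t4, t5, t6, t7⟩ := ihr (pvBGo deps d seen res).1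
          (pvBGo deps d seen res).2 visC
          (le_trans (pvKeysLeft_mono deps hmono1) hn)
          (fun x hx => hmono1 x (hSub x hx)) g6 g2 g4
          (fun d' hd' => g5 d' (hdres d' (List.mem_cons_of_mem d hd')))
        refine ⟨Δ₁ ++ Δ₂, by rw [t1, g1, List.append_assoc], t2, ?_, t4,
          fun x hx => t5 x (g5 x hx), t6, ?_⟩
        · rw [t3, List.foldl_cons, g3]
        · intro d' hd'
          rcases List.mem_cons.1 hd' with hd' | hd'
          · subst hd'
            rw [t1]
            exact List.mem_append_left _ g7
          · exact t7 d' hd'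
    exact ⟨hGO, hLOOP⟩

-- ===== VERDICT (by name: the statement is the Claim_ definition above) =====
theorem find_dependencies_recursive_spec : Claim_equal_find_dependencies_recursive := by
  unfold Claim_equal_find_dependencies_recursive
  intro module deps visited _
  unfold Spec_find_dependencies_recursive find_dependencies_recursive_alt
  have h := (pvMain deps (pvKeysLeft deps (PySem.Set.ofList visited))).1 module
    (PySem.Set.ofList visited) [] visited (Nat.le_refl _)
    (fun x hx => (PySem.Set.mem_ofList visited x).2 hx)
    (fun x hx hnv => absurd ((PySem.Set.mem_ofList visited x).1 hx) hnv)
    (PySem.Set.nodup_ofList visited) (List.nodup_nil)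
  obtain ⟨Δ, _, _, h2, _⟩ := h
  show _ = (pvBGo deps module (PySem.Set.ofList visited) []).2
  rw [h2]
  rw [show PySem.Set.update [] (find_dependencies_recursive module deps visited)
      = PySem.Set.ofList (find_dependencies_recursive module deps visited) from
      PySem.Set.update_empty _]
  rw [PySem.Set.ofList_eq_self_of_nodup _ (pvANodup module deps visited)]
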